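-- pv_equiv track=rewrite | github.com/dimtsi/AoC2021 | Day22/day22.py | run_p2
-- ===== SOURCE A (Python) =====
-- from typing import (
--     List,
--     Tuple,
--     Set,
--     Dict,
--     Iterable,
--     DefaultDict,
--     Optional,
--     Union,
--     Generator,
-- )
--
-- def volume(kuboids: List[Tuple[int, int, int, int, int, int]]) -> int:
--     total = 0
--     for kuboid in kuboids:
--         dx = kuboid[1] - kuboid[0] + 1
--         dy = kuboid[3] - kuboid[2] + 1
--         dz = kuboid[5] - kuboid[4] + 1
--         prod = dx * dy * dz
--         total += prod
--     return total
--
-- def coord_intersect(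
--     old_min: int, old_max: int, new_min: int, new_max: int
-- ) -> Optional[Tuple[int, int]]:
--     if new_max < old_min or new_min > old_max:
--         return None
--     if new_min < old_min:
--         if new_max > old_max:
--             return old_min, old_max
--         else:
--             return old_min, new_max
--     else:
--         if new_max > old_max:
--             return new_min, old_max
--         else:
--             return new_min, new_max
--
-- def get_intersection_cube(
--     old: Tuple[int, int, int, int, int, int],
--     new: Tuple[int, int, int, int, int, int],
-- ) -> Optional[Tuple[int, int, int, int, int, int]]:
--     x_min_old, x_max_old, y_min_old, y_max_old, z_min_old, z_max_old = old
--     x_min_new, x_max_new, y_min_new, y_max_new, z_min_new, z_max_new = new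
--
--     inters_x = coord_intersect(x_min_old, x_max_old, x_min_new, x_max_new)
--     if not inters_x:
--         return None
--     inters_y = coord_intersect(y_min_old, y_max_old, y_min_new, y_max_new)
--     if not inters_y:
--         return None
--     inters_z = coord_intersect(z_min_old, z_max_old, z_min_new, z_max_new)
--     if not inters_z:
--         return None
--     return *inters_x, *inters_y, *inters_z  # type: ignore
--
-- def run_p2(
--     states: List[bool], coords: List[Tuple[int, int, int, int, int, int]]
-- ) -> int:
--     positive_cubes = [coords[0]]
--     negative_cubes: List[Tuple[int, int, int, int, int, int]] = []
--
--     for i, (state, coord) in enumerate(zip(states, coords)):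
--         new_positive = []
--         new_negative = []
--         if i == 0:
--             continue
--         else:
--             for positive in positive_cubes:
--                 intersection = get_intersection_cube(positive, coord)
--                 if intersection:
--                     new_negative.append(intersection)
--             for negative in negative_cubes:
--                 intersection = get_intersection_cube(negative, coord)
--                 if intersection:
--                     new_positive.append(intersection)
--
--         if state:
--             new_positive.append(coord)
--
--         positive_cubes.extend(new_positive)
--         negative_cubes.extend(new_negative)
--
--     score = volume(positive_cubes) - volume(negative_cubes)
--     return score
-- ===== SOURCE B (Python) =====
-- from typing import List, Tuple, Optional
--
--
-- def _vol1(c: Tuple[int, int, int, int, int, int]) -> int: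
--     return (c[1] - c[0] + 1) * (c[3] - c[2] + 1) * (c[5] - c[4] + 1)
--
--
-- def _clip(a0: int, a1: int, b0: int, b1: int) -> Optional[Tuple[int, int]]:
--     if b1 < a0 or b0 > a1:
--         return None
--     return (max(a0, b0), min(a1, b1))
--
--
-- def _inter(u, v):
--     x = _clip(u[0], u[1], v[0], v[1])
--     if x is None:
--         return None
--     y = _clip(u[2], u[3], v[2], v[3])
--     if y is None:
--         return None
--     z = _clip(u[4], u[5], v[4], v[5])
--     if z is None:
--         return None
--     return x + y + z
--
--
-- def _expand(cube, cs):
--     # signed sum over all chains of iterated intersections of cube with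
--     # later cuboids cs (depth-first; sign alternates with chain length)
--     total = _vol1(cube)
--     for j, c in enumerate(cs):
--         d = _inter(cube, c)
--         if d is not None:
--             total -= _expand(d, cs[j + 1:])
--     return total
--
--
-- def run_p2(
--     states: List[bool], coords: List[Tuple[int, int, int, int, int, int]]
-- ) -> int:
--     first = coords[0]
--     rest = list(zip(states, coords))[1:]
--     cubes = [c for _, c in rest]
--     total = _expand(first, cubes)
--     for i, (s, _) in enumerate(rest):
--         if s:
--             total += _expand(cubes[i], cubes[i + 1:])
--     return total
-- ===== Notes on version B (the rewrite author's own statement) =====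
-- stated objective: alternative
-- what changed: B replaces A's iterative maintenance of two growing positive/negative cuboid lists (each instruction re-scanning both lists) by a depth-first recursive expansion that enumerates the signed intersection chains directly from the instruction list, keeping no cube lists at all; intersection is computed by overlap-test-plus-clamp (max/min) instead of A's four-way branch ladder.
-- outside the precondition, e.g. on run_p2([True], []): A raises IndexError, B raises IndexError
import Mathlib
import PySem

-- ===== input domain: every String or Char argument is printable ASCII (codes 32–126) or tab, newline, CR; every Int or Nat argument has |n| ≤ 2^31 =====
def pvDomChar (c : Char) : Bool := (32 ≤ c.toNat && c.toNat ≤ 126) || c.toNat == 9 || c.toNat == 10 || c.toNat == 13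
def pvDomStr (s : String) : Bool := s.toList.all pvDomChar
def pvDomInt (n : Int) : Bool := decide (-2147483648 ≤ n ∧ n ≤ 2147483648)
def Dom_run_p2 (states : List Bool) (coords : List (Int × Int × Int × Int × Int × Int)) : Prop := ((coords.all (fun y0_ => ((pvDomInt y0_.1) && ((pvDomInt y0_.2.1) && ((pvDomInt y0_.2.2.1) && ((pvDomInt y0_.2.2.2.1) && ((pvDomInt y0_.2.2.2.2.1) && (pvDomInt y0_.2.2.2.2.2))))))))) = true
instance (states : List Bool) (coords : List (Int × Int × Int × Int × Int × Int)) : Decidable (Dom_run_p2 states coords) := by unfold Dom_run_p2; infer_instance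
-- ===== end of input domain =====

-- B enumerates the signed intersection chains by depth-first recursion instead of
-- A's iterative maintenance of two growing positive/negative cuboid lists (objective: alternative).

-- ===== PORT A =====
def volume (kuboids : List (Int × Int × Int × Int × Int × Int)) : Int :=
  kuboids.foldl (fun total k =>
    total + (k.2.1 - k.1 + 1) * (k.2.2.2.1 - k.2.2.1 + 1) * (k.2.2.2.2.2 - k.2.2.2.2.1 + 1)) 0

def coord_intersect (old_min old_max new_min new_max : Int) : Option (Int × Int) :=
  if new_max < old_min ∨ new_min > old_max then none
  else if new_min < old_min then
    if new_max > old_max then some (old_min, old_max) else some (old_min, new_max)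
  else
    if new_max > old_max then some (new_min, old_max) else some (new_min, new_max)

def get_intersection_cube (old new : Int × Int × Int × Int × Int × Int) :
    Option (Int × Int × Int × Int × Int × Int) :=
  match coord_intersect old.1 old.2.1 new.1 new.2.1 with
  | none => none
  | some (x0, x1) =>
    match coord_intersect old.2.2.1 old.2.2.2.1 new.2.2.1 new.2.2.2.1 with
    | none => none
    | some (y0, y1) =>
      match coord_intersect old.2.2.2.2.1 old.2.2.2.2.2 new.2.2.2.2.1 new.2.2.2.2.2 with
      | none => none
      | some (z0, z1) => some (x0, x1, y0, y1, z0, z1)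

-- the for-loop of run_p2 (enumerate over zip, carrying the index i)
def loopA : List (Bool × (Int × Int × Int × Int × Int × Int)) → Nat →
    List (Int × Int × Int × Int × Int × Int) → List (Int × Int × Int × Int × Int × Int) →
    List (Int × Int × Int × Int × Int × Int) × List (Int × Int × Int × Int × Int × Int)
  | [], _, pos, neg => (pos, neg)
  | (state, coord) :: rest, i, pos, neg =>
    if i = 0 then loopA rest (i + 1) pos neg
    else
      let newNeg := pos.filterMap (fun p => get_intersection_cube p coord)
      let newPos := neg.filterMap (fun n => get_intersection_cube n coord)
      let newPos := if state then newPos ++ [coord] else newPos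
      loopA rest (i + 1) (pos ++ newPos) (neg ++ newNeg)

def run_p2 (states : List Bool) (coords : List (Int × Int × Int × Int × Int × Int)) : Int :=
  match coords with
  | [] => 0  -- Python raises IndexError here; excluded by Pre_run_p2
  | c0 :: _ =>
    let pn := loopA (states.zip coords) 0 [c0] []
    volume pn.1 - volume pn.2

-- ===== PORT B =====
def vol1 (c : Int × Int × Int × Int × Int × Int) : Int :=
  (c.2.1 - c.1 + 1) * (c.2.2.2.1 - c.2.2.1 + 1) * (c.2.2.2.2.2 - c.2.2.2.2.1 + 1)

def clip (a0 a1 b0 b1 : Int) : Option (Int × Int) :=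
  if b1 < a0 ∨ b0 > a1 then none else some (max a0 b0, min a1 b1)

def interB (u v : Int × Int × Int × Int × Int × Int) :
    Option (Int × Int × Int × Int × Int × Int) :=
  match clip u.1 u.2.1 v.1 v.2.1 with
  | none => none
  | some (x0, x1) =>
    match clip u.2.2.1 u.2.2.2.1 v.2.2.1 v.2.2.2.1 with
    | none => none
    | some (y0, y1) =>
      match clip u.2.2.2.2.1 u.2.2.2.2.2 v.2.2.2.2.1 v.2.2.2.2.2 with
      | none => none
      | some (z0, z1) => some (x0, x1, y0, y1, z0, z1)

-- _expand: depth-first signed chain expansion (expandLoop is its for-loop over later cuboids)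
mutual
def expandB (cube : Int × Int × Int × Int × Int × Int)
    (cs : List (Int × Int × Int × Int × Int × Int)) : Int :=
  vol1 cube - expandLoop cube cs
  termination_by 2 * cs.length + 1
def expandLoop (cube : Int × Int × Int × Int × Int × Int) :
    List (Int × Int × Int × Int × Int × Int) → Int
  | [] => 0
  | c :: rest =>
    (match interB cube c with
     | none => 0
     | some d => expandB d rest) + expandLoop cube rest
  termination_by cs => 2 * cs.length
end

-- the generator loop of run_p2 in Source B: each later ON instruction starts its own expansion
def chainsB : List (Bool × (Int × Int × Int × Int × Int × Int)) → Int
  | [] => 0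
  | (s, _c) :: tail =>
    (if s then expandB _c (tail.map Prod.snd) else 0) + chainsB tail

def run_p2_alt (states : List Bool) (coords : List (Int × Int × Int × Int × Int × Int)) : Int :=
  match coords with
  | [] => 0  -- Python raises IndexError here; excluded by Pre_run_p2
  | c0 :: _ =>
    let rest := (states.zip coords).drop 1
    expandB c0 (rest.map Prod.snd) + chainsB rest

-- ===== PRECONDITION & SPEC =====
-- Pre_ excludes only the empty coords list, on which Python's coords[0] raises IndexError.
def Pre_run_p2 (states : List Bool) (coords : List (Int × Int × Int × Int × Int × Int)) : Prop :=
  coords ≠ []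
instance (states : List Bool) (coords : List (Int × Int × Int × Int × Int × Int)) : Decidable (Pre_run_p2 states coords) := by unfold Pre_run_p2; infer_instance

def pvWitness_run_p2 : List Bool × (List (Int × Int × Int × Int × Int × Int)) :=
  ([true, true], [(0, 2, 0, 2, 0, 2), (1, 3, 1, 3, 1, 3)])

def Spec_run_p2 (states : List Bool) (coords : List (Int × Int × Int × Int × Int × Int)) (out : Int) : Prop := out = run_p2_alt states coords
instance (states : List Bool) (coords : List (Int × Int × Int × Int × Int × Int)) (out : Int) : Decidable (Spec_run_p2 states coords out) := by unfold Spec_run_p2; infer_instance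

-- ===== CLAIM (what is proved, stated in full; the proofs are below) =====
def Claim_equal_run_p2 : Prop := ∀ (states : List Bool) (coords : List (Int × Int × Int × Int × Int × Int)), Dom_run_p2 states coords → Pre_run_p2 states coords → Spec_run_p2 states coords (run_p2 states coords)

-- ===== LEMMAS AND PROOFS =====

-- A's branch-ladder coord_intersect equals B's overlap-test-plus-clamp clip
theorem ci_eq (a b c d : Int) : coord_intersect a b c d = clip a b c d := by
  unfold coord_intersect clip
  split_ifs with h1 h2 h3 h4 <;> simp_all <;> omega

theorem gic_eq : get_intersection_cube = interB := by
  funext o n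
  unfold get_intersection_cube interB
  simp [ci_eq]

-- peel one cuboid off an expansion
theorem expandB_cons (C c : Int × Int × Int × Int × Int × Int)
    (cs : List (Int × Int × Int × Int × Int × Int)) :
    expandB C (c :: cs) =
      expandB C cs - (match interB C c with | none => 0 | some d => expandB d cs) := by
  rw [expandB, expandB, expandLoop]
  ring

-- sum of expansions of a cuboid list against a fixed tail
def sumE (l : List (Int × Int × Int × Int × Int × Int))
    (R : List (Int × Int × Int × Int × Int × Int)) : Int :=
  (l.map (fun p => expandB p R)).sum

theorem sumE_nil (R : List (Int × Int × Int × Int × Int × Int)) : sumE [] R = 0 := rfl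

theorem sumE_append (l1 l2 R : List (Int × Int × Int × Int × Int × Int)) :
    sumE (l1 ++ l2) R = sumE l1 R + sumE l2 R := by
  unfold sumE; rw [List.map_append, List.sum_append]

-- summing the matched terms over a list = summing expansions of its filterMap
theorem match_sum (l R : List (Int × Int × Int × Int × Int × Int))
    (c : Int × Int × Int × Int × Int × Int) :
    (l.map (fun p => (match interB p c with | none => 0 | some d => expandB d R))).sum =
      ((l.filterMap (fun p => interB p c)).map (fun d => expandB d R)).sum := by
  induction l with
  | nil => rfl
  | cons x t ih =>
    simp only [List.map_cons, List.sum_cons, List.filterMap_cons]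
    cases hx : interB x c with
    | none => simpa [hx] using ih
    | some d => simp [ih]

theorem sumE_cons_tail (l R : List (Int × Int × Int × Int × Int × Int))
    (c : Int × Int × Int × Int × Int × Int) :
    sumE l (c :: R) = sumE l R - sumE (l.filterMap (fun p => interB p c)) R := by
  unfold sumE
  rw [← match_sum]
  induction l with
  | nil => simp
  | cons x t ih =>
    simp only [List.map_cons, List.sum_cons]
    rw [expandB_cons, ih]
    ring

theorem foldl_add_sum (f : (Int × Int × Int × Int × Int × Int) → Int)
    (l : List (Int × Int × Int × Int × Int × Int)) (a : Int) :
    l.foldl (fun t k => t + f k) a = a + (l.map f).sum := by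
  induction l generalizing a with
  | nil => simp
  | cons x t ih => simp [ih]; ring

theorem volume_eq_sumE (l : List (Int × Int × Int × Int × Int × Int)) :
    volume l = sumE l [] := by
  have h1 : ∀ p, expandB p [] = vol1 p := by
    intro p; simp [expandB, expandLoop]
  simp [volume, foldl_add_sum, sumE, h1, vol1]

-- main loop invariant: A's evolving list pair measures exactly B's chain sums
theorem loop_inv (zs : List (Bool × (Int × Int × Int × Int × Int × Int)))
    (pos neg : List (Int × Int × Int × Int × Int × Int)) (i : Nat) (hi : i ≠ 0) :
    volume (loopA zs i pos neg).1 - volume (loopA zs i pos neg).2 =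
      sumE pos (zs.map Prod.snd) - sumE neg (zs.map Prod.snd) + chainsB zs := by
  induction zs generalizing pos neg i with
  | nil => simp [loopA, chainsB, volume_eq_sumE]
  | cons z rest ih =>
    obtain ⟨s, c⟩ := z
    simp only [loopA, if_neg hi, gic_eq]
    rw [ih _ _ (i + 1) (Nat.succ_ne_zero i)]
    simp only [List.map_cons, chainsB]
    rw [sumE_cons_tail pos, sumE_cons_tail neg]
    have hc : sumE [c] (rest.map Prod.snd) = expandB c (rest.map Prod.snd) := by
      simp [sumE]
    cases s
    · simp only [Bool.false_eq_true, if_false, sumE_append]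
      ring
    · simp only [if_true, sumE_append, hc]
      ring

-- ===== VERDICT (by name: the statement is the Claim_ definition above) =====
theorem run_p2_spec : Claim_equal_run_p2 := by
  intro states coords _ hpre
  unfold Spec_run_p2
  match coords with
  | [] => exact absurd rfl hpre
  | c0 :: cs =>
    show run_p2 states (c0 :: cs) = run_p2_alt states (c0 :: cs)
    match states with
    | [] =>
      simp [run_p2, run_p2_alt, loopA, chainsB, volume, expandB, expandLoop, vol1]
    | s :: ss =>
      have hA : run_p2 (s :: ss) (c0 :: cs) =
          volume (loopA (ss.zip cs) 1 [c0] []).1 - volume (loopA (ss.zip cs) 1 [c0] []).2 := by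
        simp [run_p2, loopA]
      rw [hA, loop_inv _ _ _ 1 one_ne_zero]
      have hB : run_p2_alt (s :: ss) (c0 :: cs) =
          expandB c0 ((ss.zip cs).map Prod.snd) + chainsB (ss.zip cs) := by
        simp [run_p2_alt]
      rw [hB]
      have : sumE [c0] ((ss.zip cs).map Prod.snd) = expandB c0 ((ss.zip cs).map Prod.snd) := by
        simp [sumE]
      rw [this, sumE_nil]
      ring
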